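-- pv_equiv track=rewrite | github.com/S-Christensen/cartographersStudy | backend/scoringCards.py | traylomonastery
-- ===== SOURCE A (Python) =====
-- def dfs(grid, row, col, visited, terrain_type):
--     stack = [(row, col)]
--     cluster = []
--
--     while stack:
--         r, c = stack.pop()
--         if (r, c) not in visited and grid[r][c] == terrain_type:
--             visited.add((r, c))
--             cluster.append((r, c))
--             for dr, dc in [(1, 0), (-1, 0), (0, 1), (0, -1)]:
--                 nr, nc = r + dr, c + dc
--                 if 0 <= nr < len(grid) and 0 <= nc < len(grid[0]):
--                     stack.append((nr, nc))
--     return cluster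
--
-- def contains_4x1_or_1x4(cluster):
--     coordinates_set = set(cluster)
--     for r, c in coordinates_set:
--         # Check for 4x1 rectangle
--         if all((r, c + i) in coordinates_set for i in range(4)):
--             return True
--         # Check for 1x4 rectangle
--         if all((r + i, c) in coordinates_set for i in range(4)):
--             return True
--     return False
--
-- def traylomonastery(grid):
--     visited = set()
--     clusters = []
--
--     for row in range(len(grid)):
--         for col in range(len(grid[0])):
--             if (row, col) not in visited and grid[row][col] == "Village":
--                 cluster = dfs(grid, row, col, visited, "Village")
--                 clusters.append(cluster)
--
--     count = 0
--     for cluster in clusters: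
--         if contains_4x1_or_1x4(cluster):
--             count += 1
--
--     return count*7
-- ===== SOURCE B (Python) =====
-- def traylomonastery(grid):
--     rows = len(grid)
--     cols = len(grid[0]) if grid else 0
--
--     def village(r, c):
--         return 0 <= r < rows and 0 <= c < cols and grid[r][c] == "Village"
--
--     def run_start(r, c):
--         return (all(village(r, c + i) for i in range(4))
--                 or all(village(r + i, c) for i in range(4)))
--
--     visited = set()
--     count = 0
--     for r in range(rows):
--         for c in range(cols):
--             if (r, c) not in visited and run_start(r, c):
--                 count += 1
--                 stack = [(r, c)]
--                 while stack:
--                     pr, pc = stack.pop()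
--                     if (pr, pc) not in visited and village(pr, pc):
--                         visited.add((pr, pc))
--                         stack.extend([(pr + 1, pc), (pr - 1, pc),
--                                       (pr, pc + 1), (pr, pc - 1)])
--     return count * 7
-- ===== Notes on version B (the rewrite author's own statement) =====
-- stated objective: alternative
-- what changed: Instead of enumerating every Village cluster by DFS and then scanning each cluster for a 4-in-a-row, B scans the grid once for 4-run start cells and flood-fills (marking visited) only from those, counting each component the first time one of its run starts is reached; the per-cluster containment scan and the cluster lists disappear.
import Mathlib
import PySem

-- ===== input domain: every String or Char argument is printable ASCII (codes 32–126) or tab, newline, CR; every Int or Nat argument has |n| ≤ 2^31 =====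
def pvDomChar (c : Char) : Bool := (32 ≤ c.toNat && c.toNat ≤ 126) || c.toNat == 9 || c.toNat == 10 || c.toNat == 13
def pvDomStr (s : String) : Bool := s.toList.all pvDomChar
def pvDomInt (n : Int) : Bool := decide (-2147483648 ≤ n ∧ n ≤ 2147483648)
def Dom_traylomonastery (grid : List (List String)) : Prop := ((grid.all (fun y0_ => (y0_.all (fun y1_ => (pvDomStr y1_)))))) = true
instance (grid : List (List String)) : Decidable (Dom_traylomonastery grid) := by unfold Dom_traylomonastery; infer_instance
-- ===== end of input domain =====

-- B replaces A's enumerate-all-clusters-then-scan-each-for-a-4-run strategy by a single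
-- scan that flood-fills only from 4-run start cells, counting each component once
-- (objective: alternative decomposition of the same O(R*C) task).

-- ===== PORT A =====
-- grid[r][c]; guarded to be total — on admitted inputs (Pre_) every access A performs is in range,
-- so the "" default is never the value read.
def pvGetA (grid : List (List String)) (r c : Int) : String :=
  if 0 ≤ r ∧ 0 ≤ c then (grid.getD r.toNat []).getD c.toNat "" else ""

-- the for-loop over the four offsets pushing in-bounds neighbours
def pvNbrsA (grid : List (List String)) (r c : Int) : List (Int × Int) :=
  [((1:Int),(0:Int)), (-1,0), (0,1), (0,-1)].foldl (fun acc d =>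
    let nr := r + d.1
    let nc := c + d.2
    if 0 ≤ nr ∧ nr < (grid.length : Int) ∧ 0 ≤ nc ∧ nc < (((grid.headD []).length : Int)) then
      acc ++ [(nr, nc)]
    else acc) []

-- termination measure: number of in-bounds cells not yet visited
def pvMaxRow (grid : List (List String)) : Nat := (grid.map List.length).foldr max 0

def pvUnvis (grid : List (List String)) (visited : List (Int × Int)) : Nat :=
  ((Finset.range grid.length ×ˢ Finset.range (pvMaxRow grid)).filter
    (fun p => ((p.1 : Int), (p.2 : Int)) ∉ visited)).card

theorem pv_mem_le_foldr_max (l : List Nat) (a : Nat) (h : a ∈ l) : a ≤ l.foldr max 0 := by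
  induction l with
  | nil => simp at h
  | cons x t ih =>
    simp only [List.mem_cons] at h
    rcases h with h | h
    · subst h; simp [List.foldr]
    · have := ih h
      simp [List.foldr]; omega

theorem pv_row_le_max (grid : List (List String)) (n : Nat) (hn : n < grid.length) :
    (grid.getD n []).length ≤ pvMaxRow grid := by
  apply pv_mem_le_foldr_max
  have : grid.getD n [] ∈ grid := by
    rw [List.getD_eq_getElem _ _ hn]; exact List.getElem_mem hn
  exact List.mem_map_of_mem this

theorem pvGetA_village_bounds (grid : List (List String)) (r c : Int)
    (h : pvGetA grid r c = "Village") :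
    0 ≤ r ∧ 0 ≤ c ∧ r.toNat < grid.length ∧ c.toNat < (grid.getD r.toNat []).length := by
  unfold pvGetA at h
  by_cases h0 : 0 ≤ r ∧ 0 ≤ c
  · rw [if_pos h0] at h
    refine ⟨h0.1, h0.2, ?_, ?_⟩
    · by_contra hc
      rw [Nat.not_lt] at hc
      rw [List.getD_eq_default _ _ hc] at h
      simp at h
    · by_contra hc
      rw [Nat.not_lt] at hc
      rw [List.getD_eq_default _ _ hc] at h
      exact absurd h (by decide)
  · rw [if_neg h0] at h; exact absurd h (by decide)

theorem pvUnvis_lt (grid : List (List String)) (visited : List (Int × Int)) (q : Int × Int)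
    (h1 : 0 ≤ q.1) (h2 : 0 ≤ q.2) (h3 : q.1.toNat < grid.length)
    (h4 : q.2.toNat < (grid.getD q.1.toNat []).length) (h5 : q ∉ visited) :
    pvUnvis grid (PySem.Set.add visited q) < pvUnvis grid visited := by
  apply Finset.card_lt_card
  rw [Finset.ssubset_iff_of_subset]
  · refine ⟨(q.1.toNat, q.2.toNat), ?_, ?_⟩
    · simp only [Finset.mem_filter, Finset.mem_product, Finset.mem_range]
      refine ⟨⟨h3, lt_of_lt_of_le h4 (pv_row_le_max grid _ h3)⟩, ?_⟩
      simpa [Int.toNat_of_nonneg h1, Int.toNat_of_nonneg h2] using h5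
    · simp only [Finset.mem_filter, Finset.mem_product, Finset.mem_range, not_and, not_not]
      intro _
      simp [PySem.Set.mem_add, Int.toNat_of_nonneg h1, Int.toNat_of_nonneg h2]
  · intro p hp
    simp only [Finset.mem_filter] at hp ⊢
    refine ⟨hp.1, fun hm => hp.2 ?_⟩
    rw [PySem.Set.mem_add]
    exact Or.inl hm

-- the while-loop of dfs; pop() takes the last element
def pvDfsA (grid : List (List String)) (stack : List (Int × Int))
    (visited : PySem.Set (Int × Int)) (cluster : List (Int × Int)) :
    List (Int × Int) × PySem.Set (Int × Int) :=
  if hs : stack = [] then (cluster, visited)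
  else
    let q := stack.getLast hs
    let rest := stack.dropLast
    if hq : q ∉ visited ∧ pvGetA grid q.1 q.2 = "Village" then
      pvDfsA grid (rest ++ pvNbrsA grid q.1 q.2) (PySem.Set.add visited q) (cluster ++ [q])
    else
      pvDfsA grid rest visited cluster
termination_by (pvUnvis grid visited, stack.length)
decreasing_by
  · have hb := pvGetA_village_bounds grid _ _ hq.2
    exact Prod.Lex.left _ _ (pvUnvis_lt grid visited _ hb.1 hb.2.1 hb.2.2.1 hb.2.2.2 hq.1)
  · have : stack.dropLast.length < stack.length := by
      cases stack with
      | nil => exact absurd rfl hs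
      | cons a l => simp
    exact Prod.Lex.right _ this

-- contains_4x1_or_1x4: iterate over set(cluster) (result is order-independent)
def pvContains (cluster : List (Int × Int)) : Bool :=
  let s : PySem.Set (Int × Int) := PySem.Set.ofList cluster
  s.any (fun p =>
    ((List.range 4).all fun i => decide ((p.1, p.2 + (i : Int)) ∈ s)) ||
    ((List.range 4).all fun i => decide ((p.1 + (i : Int), p.2) ∈ s)))

def traylomonastery (grid : List (List String)) : Int :=
  let st :=
    (PySem.List.pyRange 0 (grid.length : Int) 1).foldl (fun st row =>
      (PySem.List.pyRange 0 ((grid.headD []).length : Int) 1).foldl (fun st col =>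
        if (row, col) ∉ st.1 ∧ pvGetA grid row col = "Village" then
          let res := pvDfsA grid [(row, col)] st.1 []
          (res.2, st.2 ++ [res.1])
        else st) st)
      ((PySem.Set.ofList [] : PySem.Set (Int × Int)), ([] : List (List (Int × Int))))
  ((st.2.countP pvContains : Nat) : Int) * 7

-- ===== PORT B =====
-- village(r, c): bounds check then grid[r][c] == "Village" (total guard on the access;
-- inside Pre_ the bounds checks make the access in range)
def pvVillB (grid : List (List String)) (r c : Int) : Bool :=
  decide (0 ≤ r) && decide (r < (grid.length : Int)) &&
  decide (0 ≤ c) && decide (c < ((grid.headD []).length : Int)) &&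
  ((grid.getD r.toNat []).getD c.toNat "" == "Village")

def pvRunB (grid : List (List String)) (r c : Int) : Bool :=
  ((List.range 4).all fun i => pvVillB grid r (c + (i : Int))) ||
  ((List.range 4).all fun i => pvVillB grid (r + (i : Int)) c)

theorem pvVillB_eq_getA (grid : List (List String)) (r c : Int) :
    pvVillB grid r c = true ↔
      (0 ≤ r ∧ r < (grid.length : Int) ∧ 0 ≤ c ∧ c < ((grid.headD []).length : Int) ∧
        pvGetA grid r c = "Village") := by
  unfold pvVillB pvGetA
  by_cases h0 : 0 ≤ r ∧ 0 ≤ c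
  · rw [if_pos h0]; simp; tauto
  · rw [if_neg h0]
    simp only [Bool.and_eq_true, decide_eq_true_eq]
    constructor
    · rintro ⟨⟨⟨⟨hr, _⟩, hc⟩, _⟩, _⟩; exact absurd ⟨hr, hc⟩ h0
    · rintro ⟨hr, _, hc, _⟩; exact absurd ⟨hr, hc⟩ h0

theorem pvVillB_bounds (grid : List (List String)) (r c : Int) (h : pvVillB grid r c = true) :
    0 ≤ r ∧ 0 ≤ c ∧ r.toNat < grid.length ∧ c.toNat < (grid.getD r.toNat []).length := by
  rw [pvVillB_eq_getA] at h
  exact pvGetA_village_bounds grid r c h.2.2.2.2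

-- the while-loop of B's flood fill; pop() takes the last element
def pvFloodB (grid : List (List String)) (stack : List (Int × Int))
    (visited : PySem.Set (Int × Int)) : PySem.Set (Int × Int) :=
  if hs : stack = [] then visited
  else
    let q := stack.getLast hs
    let rest := stack.dropLast
    if hq : q ∉ visited ∧ pvVillB grid q.1 q.2 = true then
      pvFloodB grid (rest ++ [(q.1 + 1, q.2), (q.1 - 1, q.2), (q.1, q.2 + 1), (q.1, q.2 - 1)])
        (PySem.Set.add visited q)
    else
      pvFloodB grid rest visited
termination_by (pvUnvis grid visited, stack.length)
decreasing_by
  · have hb := pvVillB_bounds grid _ _ hq.2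
    exact Prod.Lex.left _ _ (pvUnvis_lt grid visited _ hb.1 hb.2.1 hb.2.2.1 hb.2.2.2 hq.1)
  · have : stack.dropLast.length < stack.length := by
      cases stack with
      | nil => exact absurd rfl hs
      | cons a l => simp
    exact Prod.Lex.right _ this

def traylomonastery_alt (grid : List (List String)) : Int :=
  let st :=
    (PySem.List.pyRange 0 (grid.length : Int) 1).foldl (fun st r =>
      (PySem.List.pyRange 0 ((grid.headD []).length : Int) 1).foldl (fun st c =>
        if (r, c) ∉ st.1 ∧ pvRunB grid r c = true then
          (pvFloodB grid [(r, c)] st.1, st.2 + 1)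
        else st) st)
      ((PySem.Set.ofList [] : PySem.Set (Int × Int)), (0 : Int))
  st.2 * 7

-- ===== PRECONDITION & SPEC =====
-- A reads grid[row][col] for every col < len(grid[0]); on a grid containing a row shorter than
-- row 0 it raises IndexError (B raises there too). Pre_ excludes exactly those inputs.
def Pre_traylomonastery (grid : List (List String)) : Prop :=
  ∀ row ∈ grid, (grid.headD []).length ≤ row.length
instance (grid : List (List String)) : Decidable (Pre_traylomonastery grid) := by
  unfold Pre_traylomonastery; infer_instance

def pvWitness_traylomonastery : List (List String) :=
  [["Village", "Village", "Village", "Village"],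
   ["Forest", "Village", "Forest", "Forest"]]

def Spec_traylomonastery (grid : List (List String)) (out : Int) : Prop := out = traylomonastery_alt grid
instance (grid : List (List String)) (out : Int) : Decidable (Spec_traylomonastery grid out) := by
  unfold Spec_traylomonastery; infer_instance

-- ===== CLAIM (what is proved, stated in full; the proofs are below) =====
def Claim_equal_traylomonastery : Prop := ∀ (grid : List (List String)), Dom_traylomonastery grid → Pre_traylomonastery grid → Spec_traylomonastery grid (traylomonastery grid)

-- ===== LEMMAS AND PROOFS =====

-- village predicate, 4-neighbourhood, adjacency within villages, reachability
def pvVillP (grid : List (List String)) (p : Int × Int) : Prop := pvVillB grid p.1 p.2 = true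

def pvNbhd (p : Int × Int) : List (Int × Int) :=
  [(p.1 + 1, p.2), (p.1 - 1, p.2), (p.1, p.2 + 1), (p.1, p.2 - 1)]

def pvStep (grid : List (List String)) (p q : Int × Int) : Prop :=
  pvVillP grid p ∧ pvVillP grid q ∧ q ∈ pvNbhd p

def pvReach (grid : List (List String)) : (Int × Int) → (Int × Int) → Prop :=
  Relation.ReflTransGen (pvStep grid)

def pvClosed (grid : List (List String)) (V : List (Int × Int)) : Prop :=
  ∀ p q, p ∈ V → pvStep grid p q → q ∈ V

def pvInB (grid : List (List String)) (q : Int × Int) : Prop :=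
  0 ≤ q.1 ∧ q.1 < (grid.length : Int) ∧ 0 ≤ q.2 ∧ q.2 < ((grid.headD []).length : Int)

theorem pvVillP_inB (grid : List (List String)) (p : Int × Int) (h : pvVillP grid p) :
    pvInB grid p := by
  have := (pvVillB_eq_getA grid p.1 p.2).mp h
  exact ⟨this.1, this.2.1, this.2.2.1, this.2.2.2.1⟩

theorem pv_check_iff (grid : List (List String)) (q : Int × Int) (h : pvInB grid q) :
    pvGetA grid q.1 q.2 = "Village" ↔ pvVillP grid q := by
  rw [pvVillP, pvVillB_eq_getA]
  exact ⟨fun hv => ⟨h.1, h.2.1, h.2.2.1, h.2.2.2, hv⟩, fun hv => hv.2.2.2.2⟩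

theorem pv_mem_nbhd_symm (p q : Int × Int) (h : q ∈ pvNbhd p) : p ∈ pvNbhd q := by
  obtain ⟨a, b⟩ := p
  obtain ⟨x, y⟩ := q
  simp only [pvNbhd, List.mem_cons, List.not_mem_nil, or_false, Prod.mk.injEq] at h ⊢
  omega

theorem pvStep_symm (grid : List (List String)) (p q : Int × Int) (h : pvStep grid p q) :
    pvStep grid q p :=
  ⟨h.2.1, h.1, pv_mem_nbhd_symm p q h.2.2⟩

theorem pvReach_symm (grid : List (List String)) {p q : Int × Int} (h : pvReach grid p q) :
    pvReach grid q p := by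
  induction h with
  | refl => exact Relation.ReflTransGen.refl
  | tail _ hstep ih =>
    exact Relation.ReflTransGen.trans
      (Relation.ReflTransGen.single (pvStep_symm grid _ _ hstep)) ih

theorem pvReach_village (grid : List (List String)) {p q : Int × Int}
    (hp : pvVillP grid p) (h : pvReach grid p q) : pvVillP grid q := by
  induction h with
  | refl => exact hp
  | tail _ hstep _ => exact hstep.2.1

theorem pvClosed_reach (grid : List (List String)) {V : List (Int × Int)}
    (hC : pvClosed grid V) {p q : Int × Int} (hp : p ∈ V) (h : pvReach grid p q) : q ∈ V := by
  induction h with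
  | refl => exact hp
  | tail _ hstep ih => exact hC _ _ ih hstep

-- characterization of A's neighbour list
theorem pv_mem_nbrsA (grid : List (List String)) (r c : Int) (q : Int × Int) :
    q ∈ pvNbrsA grid r c ↔ q ∈ pvNbhd (r, c) ∧ pvInB grid q := by
  obtain ⟨x, y⟩ := q
  simp only [pvNbrsA, List.foldl]
  split_ifs <;>
    simp only [pvNbhd, pvInB, List.mem_cons, List.not_mem_nil, List.mem_append,
      or_false, false_or, false_iff, Prod.mk.injEq] <;>
    omega


-- ===== A's dfs computes the connected component =====
def pvInvA (grid : List (List String)) (seed : Int × Int) (vis0 : List (Int × Int))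
    (stack visited cluster : List (Int × Int)) : Prop :=
  (∀ p, p ∈ visited ↔ (p ∈ vis0 ∨ p ∈ cluster)) ∧
  (∀ p ∈ cluster, p ∉ vis0) ∧
  (∀ p ∈ cluster, pvVillP grid p ∧ pvReach grid seed p) ∧
  (∀ q ∈ stack, pvInB grid q ∧ (q = seed ∨ ∃ p ∈ cluster, q ∈ pvNbhd p)) ∧
  (∀ p ∈ cluster, ∀ q, pvStep grid p q → q ∈ visited ∨ q ∈ stack) ∧
  (seed ∈ cluster ∨ seed ∈ stack)

def pvPostA (grid : List (List String)) (seed : Int × Int) (vis0 : List (Int × Int))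
    (res : List (Int × Int) × PySem.Set (Int × Int)) : Prop :=
  (∀ p, p ∈ res.2 ↔ (p ∈ vis0 ∨ p ∈ res.1)) ∧
  (∀ p ∈ res.1, p ∉ vis0) ∧
  (∀ p ∈ res.1, pvVillP grid p ∧ pvReach grid seed p) ∧
  (∀ p ∈ res.1, ∀ q, pvStep grid p q → q ∈ res.2) ∧
  seed ∈ res.1

theorem pv_stack_decomp {stack : List (Int × Int)} (h : stack ≠ []) {r : Int × Int}
    (hr : r ∈ stack) : r ∈ stack.dropLast ∨ r = stack.getLast h := by
  rw [← List.dropLast_append_getLast h, List.mem_append, List.mem_singleton] at hr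
  exact hr

theorem pvDfsA_post (grid : List (List String)) (seed : Int × Int) (vis0 : List (Int × Int))
    (hseed : pvVillP grid seed) (hs0 : seed ∉ vis0) :
    ∀ stack visited cluster, pvInvA grid seed vis0 stack visited cluster →
      pvPostA grid seed vis0 (pvDfsA grid stack visited cluster) := by
  intro stack visited cluster
  induction stack, visited, cluster using pvDfsA.induct grid with
  | case1 visited cluster =>
    intro hinv
    obtain ⟨I1, I2, I3, _, I5, I6⟩ := hinv
    rw [pvDfsA]
    refine ⟨I1, I2, I3, ?_, ?_⟩
    · intro p hp q hq
      rcases I5 p hp q hq with h | h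
      · exact h
      · simp at h
    · rcases I6 with h | h
      · exact h
      · simp at h
  | case2 stack visited cluster h q rest hcond ih =>
    intro hinv
    obtain ⟨I1, I2, I3, I4, I5, I6⟩ := hinv
    rw [pvDfsA]
    rw [dif_neg h, dif_pos hcond]
    apply ih
    have hqmem : q ∈ stack := List.getLast_mem h
    have hqInB : pvInB grid q := (I4 q hqmem).1
    have hqVill : pvVillP grid q := (pv_check_iff grid q hqInB).mp hcond.2
    have hqReach : pvReach grid seed q := by
      rcases (I4 q hqmem).2 with he | ⟨p, hp, hnb⟩
      · rw [he]
        exact Relation.ReflTransGen.refl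
      · exact Relation.ReflTransGen.tail (I3 p hp).2 ⟨(I3 p hp).1, hqVill, hnb⟩
    have hqnv0 : q ∉ vis0 := fun hv => hcond.1 ((I1 q).mpr (Or.inl hv))
    refine ⟨?_, ?_, ?_, ?_, ?_, ?_⟩
    · intro p
      rw [PySem.Set.mem_add, I1, List.mem_append, List.mem_singleton]
      tauto
    · intro p hp
      rw [List.mem_append, List.mem_singleton] at hp
      rcases hp with hp | hp
      · exact I2 p hp
      · rw [hp]; exact hqnv0
    · intro p hp
      rw [List.mem_append, List.mem_singleton] at hp
      rcases hp with hp | hp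
      · exact I3 p hp
      · rw [hp]; exact ⟨hqVill, hqReach⟩
    · intro x hx
      rw [List.mem_append] at hx
      rcases hx with hx | hx
      · have hxs := List.dropLast_subset stack hx
        refine ⟨(I4 x hxs).1, ?_⟩
        rcases (I4 x hxs).2 with he | ⟨p, hp, hnb⟩
        · exact Or.inl he
        · exact Or.inr ⟨p, by simp [List.mem_append, hp], hnb⟩
      · rw [pv_mem_nbrsA] at hx
        exact ⟨hx.2, Or.inr ⟨q, by simp, hx.1⟩⟩
    · intro p hp r hr
      rw [List.mem_append, List.mem_singleton] at hp
      rcases hp with hp | hp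
      · rcases I5 p hp r hr with hv | hs
        · exact Or.inl (by rw [PySem.Set.mem_add]; exact Or.inl hv)
        · rcases pv_stack_decomp h hs with hd | he
          · exact Or.inr (by rw [List.mem_append]; exact Or.inl hd)
          · exact Or.inl (by rw [PySem.Set.mem_add]; exact Or.inr he)
      · subst hp
        refine Or.inr ?_
        rw [List.mem_append, pv_mem_nbrsA]
        exact Or.inr ⟨hr.2.2, pvVillP_inB grid r hr.2.1⟩
    · rcases I6 with hc | hs
      · exact Or.inl (by rw [List.mem_append]; exact Or.inl hc)
      · rcases pv_stack_decomp h hs with hd | he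
        · exact Or.inr (by rw [List.mem_append]; exact Or.inl hd)
        · exact Or.inl (by rw [List.mem_append, List.mem_singleton]; exact Or.inr he)
  | case3 stack visited cluster h q rest hcond ih =>
    intro hinv
    obtain ⟨I1, I2, I3, I4, I5, I6⟩ := hinv
    rw [pvDfsA]
    rw [dif_neg h, dif_neg hcond]
    apply ih
    have hqmem : q ∈ stack := List.getLast_mem h
    have hqInB : pvInB grid q := (I4 q hqmem).1
    have hq' : q ∈ visited ∨ ¬ pvGetA grid q.1 q.2 = "Village" := by tauto
    refine ⟨I1, I2, I3, ?_, ?_, ?_⟩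
    · intro x hx
      exact I4 x (List.dropLast_subset stack hx)
    · intro p hp r hr
      rcases I5 p hp r hr with hv | hs
      · exact Or.inl hv
      · rcases pv_stack_decomp h hs with hd | he
        · exact Or.inr hd
        · rcases hq' with hv | hnv
          · exact Or.inl (he ▸ hv)
          · exact absurd ((pv_check_iff grid q hqInB).mpr
              (by rw [show q = r from he.symm]; exact hr.2.1)) hnv
    · rcases I6 with hc | hs
      · exact Or.inl hc
      · rcases pv_stack_decomp h hs with hd | he
        · exact Or.inr hd
        · rcases hq' with hv | hnv
          · exact Or.inl (((I1 seed).mp (he ▸ hv)).resolve_left hs0)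
          · exact absurd ((pv_check_iff grid q hqInB).mpr
              (by rw [show q = seed from he.symm]; exact hseed)) hnv

theorem pvDfsA_component (grid : List (List String)) (seed : Int × Int)
    (vis0 : List (Int × Int)) (hseed : pvVillP grid seed) (hs0 : seed ∉ vis0)
    (hcl : pvClosed grid vis0) :
    (∀ p, p ∈ (pvDfsA grid [seed] vis0 []).1 ↔ pvReach grid seed p) ∧
    (∀ p, p ∈ (pvDfsA grid [seed] vis0 []).2 ↔ (p ∈ vis0 ∨ p ∈ (pvDfsA grid [seed] vis0 []).1)) ∧
    (∀ p ∈ (pvDfsA grid [seed] vis0 []).1, p ∉ vis0) ∧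
    pvClosed grid (pvDfsA grid [seed] vis0 []).2 := by
  have hpost := pvDfsA_post grid seed vis0 hseed hs0 [seed] vis0 []
    (by
      refine ⟨?_, ?_, ?_, ?_, ?_, ?_⟩
      · intro p; simp
      · intro p hp; simp at hp
      · intro p hp; simp at hp
      · intro x hx
        rw [List.mem_singleton] at hx
        exact ⟨hx ▸ pvVillP_inB grid seed hseed, Or.inl hx⟩
      · intro p hp; simp at hp
      · exact Or.inr (List.mem_singleton.mpr rfl))
  obtain ⟨P1, P2, P3, P4, P5⟩ := hpost
  have hmemcl : ∀ p, p ∈ (pvDfsA grid [seed] vis0 []).1 ↔ pvReach grid seed p := by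
    intro p
    constructor
    · intro hp; exact (P3 p hp).2
    · intro hp
      induction hp with
      | refl => exact P5
      | tail hab hbc ih =>
        rcases (P1 _).mp (P4 _ ih _ hbc) with hv | hc
        · exact absurd (pvClosed_reach grid hcl hv
            (Relation.ReflTransGen.single (pvStep_symm grid _ _ hbc))) (P2 _ ih)
        · exact hc
  refine ⟨hmemcl, P1, P2, ?_⟩
  intro p r hp hs
  rcases (P1 p).mp hp with hv | hc
  · exact (P1 r).mpr (Or.inl (hcl p r hv hs))
  · exact P4 p hc r hs


-- ===== B's flood fill marks exactly the connected component =====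
def pvInvB (grid : List (List String)) (seed : Int × Int) (vis0 : List (Int × Int))
    (stack visited : List (Int × Int)) : Prop :=
  (∀ p, p ∈ vis0 → p ∈ visited) ∧
  (∀ p, p ∈ visited → p ∈ vis0 ∨ (pvVillP grid p ∧ pvReach grid seed p ∧ p ∉ vis0)) ∧
  (∀ x ∈ stack, x = seed ∨ ∃ p, p ∈ visited ∧ p ∉ vis0 ∧ x ∈ pvNbhd p) ∧
  (∀ p, p ∈ visited → p ∉ vis0 → ∀ r, pvStep grid p r → r ∈ visited ∨ r ∈ stack) ∧
  (seed ∈ visited ∨ seed ∈ stack)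

def pvPostB (grid : List (List String)) (seed : Int × Int) (vis0 : List (Int × Int))
    (res : List (Int × Int)) : Prop :=
  (∀ p, p ∈ vis0 → p ∈ res) ∧
  (∀ p, p ∈ res → p ∈ vis0 ∨ (pvVillP grid p ∧ pvReach grid seed p ∧ p ∉ vis0)) ∧
  (∀ p, p ∈ res → p ∉ vis0 → ∀ r, pvStep grid p r → r ∈ res) ∧
  seed ∈ res

theorem pvFloodB_post (grid : List (List String)) (seed : Int × Int) (vis0 : List (Int × Int))
    (hseed : pvVillP grid seed) (_hs0 : seed ∉ vis0) :
    ∀ stack visited, pvInvB grid seed vis0 stack visited →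
      pvPostB grid seed vis0 (pvFloodB grid stack visited) := by
  intro stack visited
  induction stack, visited using pvFloodB.induct grid with
  | case1 visited =>
    intro hinv
    obtain ⟨I1, I2, _, I4, I5⟩ := hinv
    rw [pvFloodB]
    refine ⟨I1, I2, ?_, ?_⟩
    · intro p hp hp0 r hr
      rcases I4 p hp hp0 r hr with h | h
      · exact h
      · simp at h
    · rcases I5 with h | h
      · exact h
      · simp at h
  | case2 stack visited h q rest hcond ih =>
    intro hinv
    obtain ⟨I1, I2, I3, I4, I5⟩ := hinv
    rw [pvFloodB]
    rw [dif_neg h, dif_pos hcond]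
    apply ih
    have hqmem : q ∈ stack := List.getLast_mem h
    have hqVill : pvVillP grid q := hcond.2
    have hqnv0 : q ∉ vis0 := fun hv => hcond.1 (I1 q hv)
    have hqReach : pvReach grid seed q := by
      rcases I3 q hqmem with he | ⟨p, hp, hp0, hnb⟩
      · rw [he]
        exact Relation.ReflTransGen.refl
      · rcases I2 p hp with hv | ⟨hpV, hpR, _⟩
        · exact absurd hv hp0
        · exact Relation.ReflTransGen.tail hpR ⟨hpV, hqVill, hnb⟩
    have hnbhd : pvNbhd q = [(q.1 + 1, q.2), (q.1 - 1, q.2), (q.1, q.2 + 1), (q.1, q.2 - 1)] := rfl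
    refine ⟨?_, ?_, ?_, ?_, ?_⟩
    · intro p hp
      rw [PySem.Set.mem_add]
      exact Or.inl (I1 p hp)
    · intro p hp
      rw [PySem.Set.mem_add] at hp
      rcases hp with hp | hp
      · exact I2 p hp
      · rw [hp]; exact Or.inr ⟨hqVill, hqReach, hqnv0⟩
    · intro x hx
      rw [List.mem_append] at hx
      rcases hx with hx | hx
      · rcases I3 x (List.dropLast_subset stack hx) with he | ⟨p, hp, hp0, hnb⟩
        · exact Or.inl he
        · exact Or.inr ⟨p, by rw [PySem.Set.mem_add]; exact Or.inl hp, hp0, hnb⟩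
      · exact Or.inr ⟨q, by rw [PySem.Set.mem_add]; exact Or.inr rfl, hqnv0, by rw [hnbhd]; exact hx⟩
    · intro p hp hp0 r hr
      rw [PySem.Set.mem_add] at hp
      rcases hp with hp | hp
      · rcases I4 p hp hp0 r hr with hv | hs
        · exact Or.inl (by rw [PySem.Set.mem_add]; exact Or.inl hv)
        · rcases pv_stack_decomp h hs with hd | he
          · exact Or.inr (by rw [List.mem_append]; exact Or.inl hd)
          · exact Or.inl (by rw [PySem.Set.mem_add]; exact Or.inr he)
      · refine Or.inr ?_
        rw [List.mem_append]
        refine Or.inr ?_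
        rw [← hnbhd]
        have : r ∈ pvNbhd p := hr.2.2
        rw [hp] at this
        exact this
    · rcases I5 with hv | hs
      · exact Or.inl (by rw [PySem.Set.mem_add]; exact Or.inl hv)
      · rcases pv_stack_decomp h hs with hd | he
        · exact Or.inr (by rw [List.mem_append]; exact Or.inl hd)
        · exact Or.inl (by rw [PySem.Set.mem_add]; exact Or.inr he)
  | case3 stack visited h q rest hcond ih =>
    intro hinv
    obtain ⟨I1, I2, I3, I4, I5⟩ := hinv
    rw [pvFloodB]
    rw [dif_neg h, dif_neg hcond]
    apply ih
    have hq' : q ∈ visited ∨ ¬ pvVillP grid q := by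
      by_cases hv : q ∈ visited
      · exact Or.inl hv
      · exact Or.inr (fun hvill => hcond ⟨hv, hvill⟩)
    refine ⟨I1, I2, ?_, ?_, ?_⟩
    · intro x hx
      exact I3 x (List.dropLast_subset stack hx)
    · intro p hp hp0 r hr
      rcases I4 p hp hp0 r hr with hv | hs
      · exact Or.inl hv
      · rcases pv_stack_decomp h hs with hd | he
        · exact Or.inr hd
        · rcases hq' with hv | hnv
          · exact Or.inl (he ▸ hv)
          · exact absurd (by rw [show q = r from he.symm]; exact hr.2.1) hnv
    · rcases I5 with hv | hs
      · exact Or.inl hv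
      · rcases pv_stack_decomp h hs with hd | he
        · exact Or.inr hd
        · rcases hq' with hv | hnv
          · exact Or.inl (he ▸ hv)
          · exact absurd (by rw [show q = seed from he.symm]; exact hseed) hnv

theorem pvFloodB_component (grid : List (List String)) (seed : Int × Int)
    (vis0 : List (Int × Int)) (hseed : pvVillP grid seed) (hs0 : seed ∉ vis0)
    (hcl : pvClosed grid vis0) :
    ∀ p, p ∈ pvFloodB grid [seed] vis0 ↔ (p ∈ vis0 ∨ pvReach grid seed p) := by
  have hpost := pvFloodB_post grid seed vis0 hseed hs0 [seed] vis0
    (by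
      refine ⟨fun p hp => hp, ?_, ?_, ?_, ?_⟩
      · intro p hp; exact Or.inl hp
      · intro x hx
        rw [List.mem_singleton] at hx
        exact Or.inl hx
      · intro p hp hp0 r hr
        exact Or.inl (hcl p r hp hr)
      · exact Or.inr (List.mem_singleton.mpr rfl))
  obtain ⟨P1, P2, P3, P4⟩ := hpost
  intro p
  constructor
  · intro hp
    rcases P2 p hp with hv | ⟨_, hr, _⟩
    · exact Or.inl hv
    · exact Or.inr hr
  · intro hp
    rcases hp with hp | hp
    · exact P1 p hp
    · induction hp with
      | refl => exact P4
      | tail hab hbc ih =>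
        rename_i b c
        by_cases hb0 : b ∈ vis0
        · exact P1 c (hcl b c hb0 hbc)
        · exact P3 b ih hb0 c hbc


-- ===== outer loops: one shared row-major cell list =====
def pvStepA (grid : List (List String))
    (st : PySem.Set (Int × Int) × List (List (Int × Int))) (x : Int × Int) :
    PySem.Set (Int × Int) × List (List (Int × Int)) :=
  if x ∉ st.1 ∧ pvGetA grid x.1 x.2 = "Village" then
    let res := pvDfsA grid [x] st.1 []
    (res.2, st.2 ++ [res.1])
  else st

def pvStepB (grid : List (List String))
    (st : PySem.Set (Int × Int) × Int) (x : Int × Int) : PySem.Set (Int × Int) × Int :=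
  if x ∉ st.1 ∧ pvRunB grid x.1 x.2 = true then
    (pvFloodB grid [x] st.1, st.2 + 1)
  else st

def pvRM (grid : List (List String)) : List (Int × Int) :=
  (PySem.List.pyRange 0 (grid.length : Int) 1).flatMap
    (fun r => (PySem.List.pyRange 0 ((grid.headD []).length : Int) 1).map (fun c => (r, c)))

theorem pv_foldl_prod {σ : Type} (g : σ → (Int × Int) → σ) (C : Int) (rs : List Int)
    (init : σ) :
    rs.foldl (fun st r => (PySem.List.pyRange 0 C 1).foldl (fun st c => g st (r, c)) st) init
      = (rs.flatMap (fun r => (PySem.List.pyRange 0 C 1).map (fun c => (r, c)))).foldl g init := by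
  induction rs generalizing init with
  | nil => rfl
  | cons a t ih =>
    simp only [List.flatMap_cons, List.foldl_append, List.foldl_cons, List.foldl_map]
    rw [ih]

theorem pv_mem_RM (grid : List (List String)) (x : Int × Int) :
    x ∈ pvRM grid ↔ pvInB grid x := by
  obtain ⟨r, c⟩ := x
  simp only [pvRM, List.mem_flatMap, List.mem_map, PySem.List.mem_pyRange_one, pvInB,
    Prod.mk.injEq]
  constructor
  · rintro ⟨a, ⟨h1, h2⟩, b, ⟨h3, h4⟩, h5, h6⟩
    subst h5; subst h6
    exact ⟨h1, h2, h3, h4⟩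
  · rintro ⟨h1, h2, h3, h4⟩
    exact ⟨r, ⟨h1, h2⟩, c, ⟨h3, h4⟩, rfl, rfl⟩

theorem pv_portA_eq (grid : List (List String)) :
    traylomonastery grid =
      ((((pvRM grid).foldl (pvStepA grid)
          ((PySem.Set.ofList [] : PySem.Set (Int × Int)),
            ([] : List (List (Int × Int))))).2.countP pvContains : Nat) : Int) * 7 := by
  show ((((PySem.List.pyRange 0 (grid.length : Int) 1).foldl
      (fun st r => (PySem.List.pyRange 0 ((grid.headD []).length : Int) 1).foldl
        (fun st c => pvStepA grid st (r, c)) st)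
      ((PySem.Set.ofList [] : PySem.Set (Int × Int)),
        ([] : List (List (Int × Int))))).2.countP pvContains : Nat) : Int) * 7 = _
  rw [pv_foldl_prod]
  rfl

theorem pv_portB_eq (grid : List (List String)) :
    traylomonastery_alt grid =
      ((pvRM grid).foldl (pvStepB grid)
        ((PySem.Set.ofList [] : PySem.Set (Int × Int)), (0 : Int))).2 * 7 := by
  show ((PySem.List.pyRange 0 (grid.length : Int) 1).foldl
      (fun st r => (PySem.List.pyRange 0 ((grid.headD []).length : Int) 1).foldl
        (fun st c => pvStepB grid st (r, c)) st)
      ((PySem.Set.ofList [] : PySem.Set (Int × Int)), (0 : Int))).2 * 7 = _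
  rw [pv_foldl_prod]
  rfl

-- run-start cells are Village cells
theorem pv_runS_vill (grid : List (List String)) (r c : Int)
    (h : pvRunB grid r c = true) : pvVillP grid (r, c) := by
  unfold pvRunB at h
  rw [Bool.or_eq_true] at h
  rcases h with h | h
  · rw [List.all_eq_true] at h
    have := h 0 (by decide)
    simpa using this
  · rw [List.all_eq_true] at h
    have := h 0 (by decide)
    simpa using this

-- the joint invariant over the processed prefix P
def pvJ (grid : List (List String)) (P : List (Int × Int))
    (sA : PySem.Set (Int × Int) × List (List (Int × Int)))
    (sB : PySem.Set (Int × Int) × Int) : Prop :=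
  (∀ p, p ∈ sA.1 ↔ ∃ C ∈ sA.2, p ∈ C) ∧
  (∀ C ∈ sA.2, ∃ s, pvVillP grid s ∧ (∀ p, p ∈ C ↔ pvReach grid s p)) ∧
  List.Pairwise (fun C C' => ∀ p, p ∈ C → p ∉ C') sA.2 ∧
  (∀ x ∈ P, pvVillP grid x → x ∈ sA.1) ∧
  (∀ p, p ∈ sB.1 ↔ ∃ x ∈ P, pvRunB grid x.1 x.2 = true ∧ pvReach grid x p) ∧
  sB.2 = ((sA.2.countP (fun C => decide (∃ x ∈ P, pvRunB grid x.1 x.2 = true ∧ x ∈ C)) : Nat) : Int)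

theorem pvJ_closedA (grid : List (List String)) (P : List (Int × Int)) (sA) (sB)
    (hJ : pvJ grid P sA sB) : pvClosed grid sA.1 := by
  obtain ⟨J1, J2, _, _, _, _⟩ := hJ
  intro p q hp hs
  rcases (J1 p).mp hp with ⟨C, hC, hpC⟩
  obtain ⟨s, _, hCiff⟩ := J2 C hC
  exact (J1 q).mpr ⟨C, hC, (hCiff q).mpr (Relation.ReflTransGen.tail ((hCiff p).mp hpC) hs)⟩

theorem pvJ_closedB (grid : List (List String)) (P : List (Int × Int)) (sA) (sB)
    (hJ : pvJ grid P sA sB) : pvClosed grid sB.1 := by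
  obtain ⟨_, _, _, _, J5, _⟩ := hJ
  intro p q hp hs
  rcases (J5 p).mp hp with ⟨x, hx, hrun, hr⟩
  exact (J5 q).mpr ⟨x, hx, hrun, Relation.ReflTransGen.tail hr hs⟩

theorem pvJ_subBA (grid : List (List String)) (P : List (Int × Int)) (sA) (sB)
    (hJ : pvJ grid P sA sB) : ∀ p, p ∈ sB.1 → p ∈ sA.1 := by
  intro p hp
  rcases (hJ.2.2.2.2.1 p).mp hp with ⟨x, hx, hrun, hr⟩
  have hxA : x ∈ sA.1 := hJ.2.2.2.1 x hx (pv_runS_vill grid x.1 x.2 hrun)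
  exact pvClosed_reach grid (pvJ_closedA grid P sA sB hJ) hxA hr

-- if x lies in a full component C then C is exactly the cells reachable from x
theorem pv_comp_switch (grid : List (List String)) (C : List (Int × Int)) (s x : Int × Int)
    (hCiff : ∀ p, p ∈ C ↔ pvReach grid s p) (hx : x ∈ C) :
    ∀ p, p ∈ C ↔ pvReach grid x p := by
  intro p
  have hsx : pvReach grid s x := (hCiff x).mp hx
  constructor
  · intro hp
    exact Relation.ReflTransGen.trans (pvReach_symm grid hsx) ((hCiff p).mp hp)
  · intro hp
    exact (hCiff p).mpr (Relation.ReflTransGen.trans hsx hp)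

-- each cluster entry is nonempty, so pairwise-disjoint entries are Nodup
theorem pvJ_nodup (grid : List (List String)) (P : List (Int × Int)) (sA) (sB)
    (hJ : pvJ grid P sA sB) : sA.2.Nodup := by
  obtain ⟨_, J2, J3, _, _, _⟩ := hJ
  refine List.Pairwise.imp_of_mem ?_ J3
  intro C C' hC _ hdis heq
  obtain ⟨s, _, hCiff⟩ := J2 C hC
  have hsC : s ∈ C := (hCiff s).mpr Relation.ReflTransGen.refl
  exact hdis s hsC (heq ▸ hsC)

theorem pv_pairwise_get (l : List (List (Int × Int)))
    (h : List.Pairwise (fun C C' => ∀ p, p ∈ C → p ∉ C') l)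
    {C C' : List (Int × Int)} (hC : C ∈ l) (hC' : C' ∈ l) (hne : C ≠ C') :
    ∀ p, p ∈ C → p ∉ C' := by
  induction l with
  | nil => simp at hC
  | cons a t ih =>
    rw [List.pairwise_cons] at h
    rcases List.mem_cons.mp hC with rfl | hCt
    · rcases List.mem_cons.mp hC' with rfl | hC't
      · exact absurd rfl hne
      · exact h.1 C' hC't
    · rcases List.mem_cons.mp hC' with rfl | hC't
      · intro p hp hp'
        exact h.1 C hCt p hp' hp
      · exact ih h.2 hCt hC't
  
theorem pv_countP_flip {α : Type} [DecidableEq α] (l : List α) (p q : α → Bool) (a : α)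
    (ha : a ∈ l) (hnd : l.Nodup) (hpa : p a = false) (hqa : q a = true)
    (hother : ∀ b ∈ l, b ≠ a → p b = q b) : l.countP q = l.countP p + 1 := by
  induction l with
  | nil => simp at ha
  | cons x t ih =>
    rw [List.nodup_cons] at hnd
    rcases List.mem_cons.mp ha with rfl | hat
    · have : t.countP p = t.countP q := by
        apply List.countP_congr
        intro b hb
        rw [hother b (List.mem_cons_of_mem _ hb) (fun hba => hnd.1 (hba ▸ hb))]
      simp [hpa, hqa, this]
    · have hxa : x ≠ a := fun hxa => hnd.1 (hxa ▸ hat)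
      have hx : p x = q x := hother x List.mem_cons_self hxa
      have := ih hat hnd.2 (fun b hb hba => hother b (List.mem_cons_of_mem _ hb) hba)
      simp [List.countP_cons, ← hx, this]
      omega

theorem pvJ_step (grid : List (List String)) (P : List (Int × Int))
    (sA : PySem.Set (Int × Int) × List (List (Int × Int)))
    (sB : PySem.Set (Int × Int) × Int) (x : Int × Int) (hx : pvInB grid x)
    (hJ : pvJ grid P sA sB) :
    pvJ grid (P ++ [x]) (pvStepA grid sA x) (pvStepB grid sB x) := by
  obtain ⟨J1, J2, J3, J4, J5, J6⟩ := hJ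
  have hclA := pvJ_closedA grid P sA sB ⟨J1, J2, J3, J4, J5, J6⟩
  have hclB := pvJ_closedB grid P sA sB ⟨J1, J2, J3, J4, J5, J6⟩
  have hsub := pvJ_subBA grid P sA sB ⟨J1, J2, J3, J4, J5, J6⟩
  have hnd := pvJ_nodup grid P sA sB ⟨J1, J2, J3, J4, J5, J6⟩
  have hchk := pv_check_iff grid x hx
  by_cases hA : x ∉ sA.1 ∧ pvGetA grid x.1 x.2 = "Village"
  · -- A flood-fills a new cluster
    have hvx : pvVillP grid x := hchk.mp hA.2
    obtain ⟨D1, D2, D3, _⟩ := pvDfsA_component grid x sA.1 hvx hA.1 hclA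
    have hxD : x ∈ (pvDfsA grid [x] sA.1 []).1 := (D1 x).mpr Relation.ReflTransGen.refl
    have holdpred : ∀ C ∈ sA.2,
        (∃ y ∈ P ++ [x], pvRunB grid y.1 y.2 = true ∧ y ∈ C) ↔
        (∃ y ∈ P, pvRunB grid y.1 y.2 = true ∧ y ∈ C) := by
      intro C hC
      constructor
      · rintro ⟨y, hyP, hyR, hyC⟩
        rcases List.mem_append.mp hyP with hyP | hyx
        · exact ⟨y, hyP, hyR, hyC⟩
        · rw [List.mem_singleton] at hyx
          subst hyx
          exact absurd ((J1 y).mpr ⟨C, hC, hyC⟩) hA.1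
      · rintro ⟨y, hyP, hyR, hyC⟩
        exact ⟨y, List.mem_append.mpr (Or.inl hyP), hyR, hyC⟩
    by_cases hB : x ∉ sB.1 ∧ pvRunB grid x.1 x.2 = true
    · -- case C1: both fire
      have hF := pvFloodB_component grid x sB.1 (pv_runS_vill grid x.1 x.2 hB.2) hB.1 hclB
      rw [pvStepA, if_pos hA, pvStepB, if_pos hB]
      refine ⟨?_, ?_, ?_, ?_, ?_, ?_⟩
      · intro p
        rw [D2, J1]
        simp only [List.mem_append, List.mem_singleton]
        constructor
        · rintro (⟨C, hC, hpC⟩ | hp)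
          · exact ⟨C, Or.inl hC, hpC⟩
          · exact ⟨_, Or.inr rfl, hp⟩
        · rintro ⟨C, hC | rfl, hpC⟩
          · exact Or.inl ⟨C, hC, hpC⟩
          · exact Or.inr hpC
      · intro C hC
        rcases List.mem_append.mp hC with hC | hC
        · exact J2 C hC
        · rw [List.mem_singleton] at hC
          subst hC
          exact ⟨x, hvx, D1⟩
      · rw [List.pairwise_append]
        refine ⟨J3, List.pairwise_singleton _ _, ?_⟩
        intro C hC C' hC' p hpC
        rw [List.mem_singleton] at hC'
        subst hC'
        intro hpD
        exact D3 p hpD ((J1 p).mpr ⟨C, hC, hpC⟩)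
      · intro y hy hvy
        rcases List.mem_append.mp hy with hy | hy
        · exact (D2 y).mpr (Or.inl (J4 y hy hvy))
        · rw [List.mem_singleton] at hy
          subst hy
          exact (D2 y).mpr (Or.inr hxD)
      · intro p
        rw [hF, J5]
        constructor
        · rintro (⟨y, hyP, hyR, hyRe⟩ | hp)
          · exact ⟨y, List.mem_append.mpr (Or.inl hyP), hyR, hyRe⟩
          · exact ⟨x, List.mem_append.mpr (Or.inr (List.mem_singleton.mpr rfl)), hB.2, hp⟩
        · rintro ⟨y, hyP, hyR, hyRe⟩
          rcases List.mem_append.mp hyP with hyP | hyx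
          · exact Or.inl ⟨y, hyP, hyR, hyRe⟩
          · rw [List.mem_singleton] at hyx
            subst hyx
            exact Or.inr hyRe
      · have hcongr : sA.2.countP
            (fun C => decide (∃ y ∈ P ++ [x], pvRunB grid y.1 y.2 = true ∧ y ∈ C)) =
            sA.2.countP (fun C => decide (∃ y ∈ P, pvRunB grid y.1 y.2 = true ∧ y ∈ C)) := by
          apply List.countP_congr
          intro C hC
          simp only [decide_eq_true_eq]
          exact holdpred C hC
        have hnew : List.countP
            (fun C => decide (∃ y ∈ P ++ [x], pvRunB grid y.1 y.2 = true ∧ y ∈ C))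
            [(pvDfsA grid [x] sA.1 []).1] = 1 := by
          simp only [List.countP_cons, List.countP_nil, decide_eq_true_eq]
          rw [if_pos ⟨x, List.mem_append.mpr (Or.inr (List.mem_singleton.mpr rfl)), hB.2, hxD⟩]
        rw [List.countP_append, hcongr, hnew, J6]
        push_cast
        ring
    · -- case C2: A fires, B does not: x is not a run start
      have hnr : pvRunB grid x.1 x.2 = false := by
        by_contra hr
        rw [Bool.not_eq_false] at hr
        have hxB : x ∈ sB.1 := by
          by_contra hxB
          exact hB ⟨hxB, hr⟩
        exact hA.1 (hsub x hxB)
      rw [pvStepA, if_pos hA, pvStepB, if_neg hB]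
      refine ⟨?_, ?_, ?_, ?_, ?_, ?_⟩
      · intro p
        rw [D2, J1]
        simp only [List.mem_append, List.mem_singleton]
        constructor
        · rintro (⟨C, hC, hpC⟩ | hp)
          · exact ⟨C, Or.inl hC, hpC⟩
          · exact ⟨_, Or.inr rfl, hp⟩
        · rintro ⟨C, hC | rfl, hpC⟩
          · exact Or.inl ⟨C, hC, hpC⟩
          · exact Or.inr hpC
      · intro C hC
        rcases List.mem_append.mp hC with hC | hC
        · exact J2 C hC
        · rw [List.mem_singleton] at hC
          subst hC
          exact ⟨x, hvx, D1⟩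
      · rw [List.pairwise_append]
        refine ⟨J3, List.pairwise_singleton _ _, ?_⟩
        intro C hC C' hC' p hpC
        rw [List.mem_singleton] at hC'
        subst hC'
        intro hpD
        exact D3 p hpD ((J1 p).mpr ⟨C, hC, hpC⟩)
      · intro y hy hvy
        rcases List.mem_append.mp hy with hy | hy
        · exact (D2 y).mpr (Or.inl (J4 y hy hvy))
        · rw [List.mem_singleton] at hy
          subst hy
          exact (D2 y).mpr (Or.inr hxD)
      · intro p
        rw [J5]
        constructor
        · rintro ⟨y, hyP, hyR, hyRe⟩
          exact ⟨y, List.mem_append.mpr (Or.inl hyP), hyR, hyRe⟩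
        · rintro ⟨y, hyP, hyR, hyRe⟩
          rcases List.mem_append.mp hyP with hyP | hyx
          · exact ⟨y, hyP, hyR, hyRe⟩
          · rw [List.mem_singleton] at hyx
            subst hyx
            rw [hnr] at hyR
            simp at hyR
      · have hcongr : sA.2.countP
            (fun C => decide (∃ y ∈ P ++ [x], pvRunB grid y.1 y.2 = true ∧ y ∈ C)) =
            sA.2.countP (fun C => decide (∃ y ∈ P, pvRunB grid y.1 y.2 = true ∧ y ∈ C)) := by
          apply List.countP_congr
          intro C hC
          simp only [decide_eq_true_eq]
          exact holdpred C hC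
        have hnew : List.countP
            (fun C => decide (∃ y ∈ P ++ [x], pvRunB grid y.1 y.2 = true ∧ y ∈ C))
            [(pvDfsA grid [x] sA.1 []).1] = 0 := by
          simp only [List.countP_cons, List.countP_nil, decide_eq_true_eq]
          rw [if_neg]
          rintro ⟨y, hyP, hyR, hyD⟩
          rcases List.mem_append.mp hyP with hyP | hyx
          · exact D3 y hyD (J4 y hyP (pv_runS_vill grid y.1 y.2 hyR))
          · rw [List.mem_singleton] at hyx
            rw [hyx, hnr] at hyR
            simp at hyR
        rw [List.countP_append, hcongr, hnew, J6]
        push_cast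
        ring
  · -- A does not fire at x
    by_cases hB : x ∉ sB.1 ∧ pvRunB grid x.1 x.2 = true
    · -- case C3: B counts a component that A has already collected
      have hvx : pvVillP grid x := pv_runS_vill grid x.1 x.2 hB.2
      have hxA : x ∈ sA.1 := by
        by_contra hxA
        exact hA ⟨hxA, hchk.mpr hvx⟩
      have hF := pvFloodB_component grid x sB.1 hvx hB.1 hclB
      rw [pvStepA, if_neg hA, pvStepB, if_pos hB]
      obtain ⟨C0, hC0, hxC0⟩ := (J1 x).mp hxA
      obtain ⟨s0, hs0v, hC0iff⟩ := J2 C0 hC0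
      have hC0x : ∀ p, p ∈ C0 ↔ pvReach grid x p := pv_comp_switch grid C0 s0 x hC0iff hxC0
      refine ⟨J1, J2, J3, ?_, ?_, ?_⟩
      · intro y hy hvy
        rcases List.mem_append.mp hy with hy | hy
        · exact J4 y hy hvy
        · rw [List.mem_singleton] at hy
          subst hy
          exact hxA
      · intro p
        rw [hF, J5]
        constructor
        · rintro (⟨y, hyP, hyR, hyRe⟩ | hp)
          · exact ⟨y, List.mem_append.mpr (Or.inl hyP), hyR, hyRe⟩
          · exact ⟨x, List.mem_append.mpr (Or.inr (List.mem_singleton.mpr rfl)), hB.2, hp⟩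
        · rintro ⟨y, hyP, hyR, hyRe⟩
          rcases List.mem_append.mp hyP with hyP | hyx
          · exact Or.inl ⟨y, hyP, hyR, hyRe⟩
          · rw [List.mem_singleton] at hyx
            subst hyx
            exact Or.inr hyRe
      · have hp0 : (fun C => decide (∃ y ∈ P, pvRunB grid y.1 y.2 = true ∧ y ∈ C)) C0 = false := by
          simp only [decide_eq_false_iff_not]
          rintro ⟨y, hyP, hyR, hyC0⟩
          have : pvReach grid y x := by
            have hyx : pvReach grid x y := (hC0x y).mp hyC0
            exact pvReach_symm grid hyx
          exact hB.1 ((J5 x).mpr ⟨y, hyP, hyR, this⟩)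
        have hq0 : (fun C => decide (∃ y ∈ P ++ [x], pvRunB grid y.1 y.2 = true ∧ y ∈ C)) C0 = true := by
          simp only [decide_eq_true_eq]
          exact ⟨x, List.mem_append.mpr (Or.inr (List.mem_singleton.mpr rfl)), hB.2, hxC0⟩
        have hoth : ∀ C ∈ sA.2, C ≠ C0 →
            (fun C => decide (∃ y ∈ P, pvRunB grid y.1 y.2 = true ∧ y ∈ C)) C =
            (fun C => decide (∃ y ∈ P ++ [x], pvRunB grid y.1 y.2 = true ∧ y ∈ C)) C := by
          intro C hC hne
          simp only [decide_eq_decide]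
          constructor
          · rintro ⟨y, hyP, hyR, hyC⟩
            exact ⟨y, List.mem_append.mpr (Or.inl hyP), hyR, hyC⟩
          · rintro ⟨y, hyP, hyR, hyC⟩
            rcases List.mem_append.mp hyP with hyP | hyx
            · exact ⟨y, hyP, hyR, hyC⟩
            · rw [List.mem_singleton] at hyx
              rw [hyx] at hyC
              exact absurd hyC (pv_pairwise_get sA.2 J3 hC0 hC
                (fun h => hne h.symm) x hxC0)
        have hflip := pv_countP_flip sA.2 _ _ C0 hC0 hnd hp0 hq0
          (fun b hb hbne => hoth b hb hbne)
        rw [hflip, J6]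
        push_cast
        ring
    · -- case C4: neither fires
      rw [pvStepA, if_neg hA, pvStepB, if_neg hB]
      have hBmem : pvRunB grid x.1 x.2 = true → x ∈ sB.1 := by
        intro hr
        by_contra hxB
        exact hB ⟨hxB, hr⟩
      refine ⟨J1, J2, J3, ?_, ?_, ?_⟩
      · intro y hy hvy
        rcases List.mem_append.mp hy with hy | hy
        · exact J4 y hy hvy
        · rw [List.mem_singleton] at hy
          subst hy
          by_contra hxA'
          exact hA ⟨hxA', hchk.mpr hvy⟩
      · intro p
        rw [J5]
        constructor
        · rintro ⟨y, hyP, hyR, hyRe⟩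
          exact ⟨y, List.mem_append.mpr (Or.inl hyP), hyR, hyRe⟩
        · rintro ⟨y, hyP, hyR, hyRe⟩
          rcases List.mem_append.mp hyP with hyP | hyx
          · exact ⟨y, hyP, hyR, hyRe⟩
          · rw [List.mem_singleton] at hyx
            subst hyx
            have hxB : y ∈ sB.1 := hBmem hyR
            exact (J5 p).mp (pvClosed_reach grid hclB hxB hyRe)
      · rw [J6]
        congr 1
        apply List.countP_congr
        intro C hC
        simp only [decide_eq_true_eq]
        constructor
        · rintro ⟨y, hyP, hyR, hyC⟩
          exact ⟨y, List.mem_append.mpr (Or.inl hyP), hyR, hyC⟩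
        · rintro ⟨y, hyP, hyR, hyC⟩
          rcases List.mem_append.mp hyP with hyP | hyx
          · exact ⟨y, hyP, hyR, hyC⟩
          · rw [List.mem_singleton] at hyx
            subst hyx
            have hxB : y ∈ sB.1 := hBmem hyR
            obtain ⟨z, hzP, hzR, hzRe⟩ := (J5 y).mp hxB
            obtain ⟨s, hsv, hCiff⟩ := J2 C hC
            have hzC : z ∈ C := by
              rw [hCiff]
              exact Relation.ReflTransGen.trans ((hCiff y).mp hyC) (pvReach_symm grid hzRe)
            exact ⟨z, hzP, hzR, hzC⟩

theorem pvJ_fold (grid : List (List String)) (L : List (Int × Int)) :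
    ∀ (P : List (Int × Int)) sA sB, (∀ x ∈ L, pvInB grid x) → pvJ grid P sA sB →
      pvJ grid (P ++ L) (L.foldl (pvStepA grid) sA) (L.foldl (pvStepB grid) sB) := by
  induction L with
  | nil =>
    intro P sA sB _ hJ
    simpa using hJ
  | cons x t ih =>
    intro P sA sB hInB hJ
    have h1 := pvJ_step grid P sA sB x (hInB x List.mem_cons_self) hJ
    have h2 := ih (P ++ [x]) _ _ (fun y hy => hInB y (List.mem_cons_of_mem _ hy)) h1
    rw [List.append_assoc] at h2
    simpa using h2

-- a component contains a 4-in-a-row iff it contains a run-start cell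
theorem pv_hsteps (grid : List (List String)) (a b : Int)
    (v : ∀ i ∈ List.range 4, pvVillB grid a (b + (i : Int)) = true) :
    ∀ i ∈ List.range 4, pvReach grid (a, b) (a, b + (i : Int)) := by
  have v0 := v 0 (by decide)
  have v1 := v 1 (by decide)
  have v2 := v 2 (by decide)
  have v3 := v 3 (by decide)
  have w0 : pvVillP grid (a, b) := by simpa using v0
  have w1 : pvVillP grid (a, b + 1) := by simpa using v1
  have w2 : pvVillP grid (a, b + 2) := by simpa using v2
  have w3 : pvVillP grid (a, b + 3) := by simpa using v3
  have s01 : pvStep grid (a, b) (a, b + 1) :=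
    ⟨w0, w1, by simp [pvNbhd]⟩
  have s12 : pvStep grid (a, b + 1) (a, b + 2) :=
    ⟨w1, w2, by simp [pvNbhd]; try omega⟩
  have s23 : pvStep grid (a, b + 2) (a, b + 3) :=
    ⟨w2, w3, by simp [pvNbhd]; try omega⟩
  have r0 : pvReach grid (a, b) (a, b) := Relation.ReflTransGen.refl
  have r1 := Relation.ReflTransGen.tail r0 s01
  have r2 := Relation.ReflTransGen.tail r1 s12
  have r3 := Relation.ReflTransGen.tail r2 s23
  intro i hi
  rw [List.mem_range] at hi
  interval_cases i
  · simpa using r0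
  · simpa using r1
  · simpa using r2
  · simpa using r3

theorem pv_vsteps (grid : List (List String)) (a b : Int)
    (v : ∀ i ∈ List.range 4, pvVillB grid (a + (i : Int)) b = true) :
    ∀ i ∈ List.range 4, pvReach grid (a, b) (a + (i : Int), b) := by
  have v0 := v 0 (by decide)
  have v1 := v 1 (by decide)
  have v2 := v 2 (by decide)
  have v3 := v 3 (by decide)
  have w0 : pvVillP grid (a, b) := by simpa using v0
  have w1 : pvVillP grid (a + 1, b) := by simpa using v1
  have w2 : pvVillP grid (a + 2, b) := by simpa using v2
  have w3 : pvVillP grid (a + 3, b) := by simpa using v3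
  have s01 : pvStep grid (a, b) (a + 1, b) :=
    ⟨w0, w1, by simp [pvNbhd]⟩
  have s12 : pvStep grid (a + 1, b) (a + 2, b) :=
    ⟨w1, w2, by simp [pvNbhd]; try omega⟩
  have s23 : pvStep grid (a + 2, b) (a + 3, b) :=
    ⟨w2, w3, by simp [pvNbhd]; try omega⟩
  have r0 : pvReach grid (a, b) (a, b) := Relation.ReflTransGen.refl
  have r1 := Relation.ReflTransGen.tail r0 s01
  have r2 := Relation.ReflTransGen.tail r1 s12
  have r3 := Relation.ReflTransGen.tail r2 s23
  intro i hi
  rw [List.mem_range] at hi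
  interval_cases i
  · simpa using r0
  · simpa using r1
  · simpa using r2
  · simpa using r3

theorem pv_contains_iff (grid : List (List String)) (C : List (Int × Int)) (s : Int × Int)
    (hsv : pvVillP grid s) (hCiff : ∀ p, p ∈ C ↔ pvReach grid s p) :
    pvContains C = true ↔ ∃ x ∈ C, pvRunB grid x.1 x.2 = true := by
  have hCv : ∀ p ∈ C, pvVillP grid p := by
    intro p hp
    exact pvReach_village grid hsv ((hCiff p).mp hp)
  unfold pvContains
  rw [List.any_eq_true]
  constructor
  · rintro ⟨p, hpC, hor⟩
    rw [PySem.Set.mem_ofList] at hpC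
    refine ⟨p, hpC, ?_⟩
    rw [Bool.or_eq_true] at hor
    unfold pvRunB
    rw [Bool.or_eq_true]
    rcases hor with hall | hall
    · left
      rw [List.all_eq_true] at hall ⊢
      intro i hi
      have := hall i hi
      rw [decide_eq_true_eq, PySem.Set.mem_ofList] at this
      exact hCv _ this
    · right
      rw [List.all_eq_true] at hall ⊢
      intro i hi
      have := hall i hi
      rw [decide_eq_true_eq, PySem.Set.mem_ofList] at this
      exact hCv _ this
  · rintro ⟨x, hxC, hrun⟩
    have hCx : ∀ p, p ∈ C ↔ pvReach grid x p := pv_comp_switch grid C s x hCiff hxC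
    refine ⟨x, (PySem.Set.mem_ofList _ _).mpr hxC, ?_⟩
    unfold pvRunB at hrun
    rw [Bool.or_eq_true] at hrun
    rw [Bool.or_eq_true]
    rcases hrun with hall | hall
    · left
      rw [List.all_eq_true] at hall
      have hreach := pv_hsteps grid x.1 x.2 (fun i hi => hall i hi)
      rw [List.all_eq_true]
      intro i hi
      rw [decide_eq_true_eq, PySem.Set.mem_ofList]
      exact (hCx _).mpr (hreach i hi)
    · right
      rw [List.all_eq_true] at hall
      have hreach := pv_vsteps grid x.1 x.2 (fun i hi => hall i hi)
      rw [List.all_eq_true]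
      intro i hi
      rw [decide_eq_true_eq, PySem.Set.mem_ofList]
      exact (hCx _).mpr (hreach i hi)
-- ===== VERDICT (by name: the statement is the Claim_ definition above) =====
theorem traylomonastery_spec : Claim_equal_traylomonastery := by
  intro grid _ _
  unfold Spec_traylomonastery
  rw [pv_portA_eq, pv_portB_eq]
  have hJ0 : pvJ grid [] ((PySem.Set.ofList [] : PySem.Set (Int × Int)), [])
      ((PySem.Set.ofList [] : PySem.Set (Int × Int)), (0 : Int)) := by
    refine ⟨?_, ?_, ?_, ?_, ?_, ?_⟩
    · intro p
      constructor
      · intro hp; simp [PySem.Set.ofList] at hp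
      · rintro ⟨C, hC, _⟩; simp at hC
    · intro C hC; simp at hC
    · simp
    · intro y hy; simp at hy
    · intro p
      constructor
      · intro hp; simp [PySem.Set.ofList] at hp
      · rintro ⟨y, hy, _⟩; simp at hy
    · simp
  have hfold := pvJ_fold grid (pvRM grid) [] _ _
    (fun x hx => (pv_mem_RM grid x).mp hx) hJ0
  rw [List.nil_append] at hfold
  obtain ⟨F1, F2, F3, F4, F5, F6⟩ := hfold
  rw [F6]
  have hcnt : ((pvRM grid).foldl (pvStepA grid)
        ((PySem.Set.ofList [] : PySem.Set (Int × Int)), [])).2.countP pvContains =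
      ((pvRM grid).foldl (pvStepA grid)
        ((PySem.Set.ofList [] : PySem.Set (Int × Int)), [])).2.countP
        (fun C => decide (∃ x ∈ pvRM grid, pvRunB grid x.1 x.2 = true ∧ x ∈ C)) := by
    apply List.countP_congr
    intro C hC
    obtain ⟨sc, hscv, hCiff⟩ := F2 C hC
    rw [pv_contains_iff grid C sc hscv hCiff]
    rw [decide_eq_true_eq]
    constructor
    · rintro ⟨x, hxC, hxR⟩
      have hvx : pvVillP grid x := pvReach_village grid hscv ((hCiff x).mp hxC)
      exact ⟨x, (pv_mem_RM grid x).mpr (pvVillP_inB grid x hvx), hxR, hxC⟩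
    · rintro ⟨x, _, hxR, hxC⟩
      exact ⟨x, hxC, hxR⟩
  rw [hcnt]
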